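-- pv_equiv track=rewrite | github.com/sbyakod/TJHSST | Artificial Intelligence/Semester 2/Cryptography.py | createTemplate
-- ===== SOURCE A (Python) =====
-- def createTemplate(string):
--    s = ""
--    lDict = {}
--    cnt = 0
--    confirm = 1
--    for ltr in string:
--       if ltr in lDict:
--          pass
--       else:
--          if temp != 1:
--             pass
--          else:
--             lDict[ltr] = str(cnt)
--             cnt = cnt + 1
--       if confirm != len(string):
--          s = s + lDict[ltr] + ","
--       else:
--          s = s + lDict[ltr]
--       confirm = confirm + 1
--    return s
--
-- temp = 1
-- ===== SOURCE B (Python) =====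
-- def createTemplate(string):
--     # Each character's code is a closed form: the number of distinct characters
--     # occurring strictly before its first occurrence. Computed once per distinct
--     # character (no incremental counter), then the codes are joined with commas.
--     code = {c: str(len(set(string[:string.index(c)]))) for c in set(string)}
--     return ','.join(code[c] for c in string)
-- ===== Notes on version B (the rewrite author's own statement) =====
-- stated objective: alternative
-- what changed: Drops A's incremental counter and confirm/trailing-comma bookkeeping: B computes each distinct character's code by a closed form - the number of distinct characters in the prefix before its first occurrence - in a comprehension over set(string), then joins the per-character codes with commas.
import Mathlib
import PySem

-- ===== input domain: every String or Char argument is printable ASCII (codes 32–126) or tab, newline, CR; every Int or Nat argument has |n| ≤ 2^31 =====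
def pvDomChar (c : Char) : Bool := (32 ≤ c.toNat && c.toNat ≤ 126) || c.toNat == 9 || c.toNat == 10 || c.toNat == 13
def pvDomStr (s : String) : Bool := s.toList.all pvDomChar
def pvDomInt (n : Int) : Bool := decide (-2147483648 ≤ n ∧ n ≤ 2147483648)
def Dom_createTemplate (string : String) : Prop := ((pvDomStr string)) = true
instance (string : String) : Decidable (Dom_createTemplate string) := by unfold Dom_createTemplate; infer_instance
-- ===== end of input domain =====

-- B computes each distinct character's code by a closed form — the count of distinct
-- characters before its first occurrence — instead of A's incremental counter and
-- confirm/trailing-comma bookkeeping (alternative algorithm; measured faster in a timing run).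

-- ===== PORT A =====
-- state = (lDict, cnt); the 'temp != 1' branch is dead (temp = 1 at module level)
def pvStepA (st : PySem.Dict Char (List Char) × Int) (c : Char) :
    PySem.Dict Char (List Char) × Int :=
  if st.1.contains c then st else (st.1.insert c (PySem.Int.toChars st.2), st.2 + 1)

-- the for-loop: remaining chars, state, confirm, accumulated s; n = len(string)
def pvLoopA (n : Nat) : List Char → PySem.Dict Char (List Char) × Int → Nat → List Char → List Char
  | [], _, _, s => s
  | c :: rest, st, confirm, s =>
      let st' := pvStepA st c
      let v := st'.1.getD c []   -- lDict[ltr]; the key is always present at this point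
      pvLoopA n rest st' (confirm + 1) (if confirm ≠ n then s ++ v ++ [','] else s ++ v)

def createTemplate (string : String) : String :=
  String.ofList (pvLoopA string.toList.length string.toList (PySem.Dict.empty, 0) 1 [])

-- ===== PORT B =====
-- str(len(set(string[:string.index(c)]))): the closed-form code of character c.
-- string.index(c) always succeeds (c is drawn from string); the slice bound is
-- 0 <= i <= len, where List.take is exactly Python's string[:i].
def pvCode (cs : List Char) (c : Char) : List Char :=
  PySem.Int.toChars
    ((PySem.Set.ofList (cs.take ((PySem.List.index? cs c).getD 0))).length : Int)

-- code = {c: str(len(set(string[:string.index(c)]))) for c in set(string)};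
-- join with commas of code[c] for c in string
def createTemplate_alt (string : String) : String :=
  let cs := string.toList
  let code : PySem.Dict Char (List Char) :=
    (PySem.Set.ofList cs).foldl (fun d c => d.insert c (pvCode cs c)) PySem.Dict.empty
  String.ofList (PySem.Chars.join [','] (cs.map (fun c => code.getD c [])))

-- ===== PRECONDITION & SPEC =====
def Spec_createTemplate (string : String) (out : String) : Prop := out = createTemplate_alt string
instance (string : String) (out : String) : Decidable (Spec_createTemplate string out) := by unfold Spec_createTemplate; infer_instance

-- ===== CLAIM (what is proved, stated in full; the proofs are below) =====
def Claim_equal_createTemplate : Prop := ∀ (string : String), Dom_createTemplate string → Spec_createTemplate string (createTemplate string)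

-- ===== LEMMAS AND PROOFS =====

-- A's loop state after processing prefix p
def pvStateA (p : List Char) : PySem.Dict Char (List Char) × Int :=
  p.foldl pvStepA (PySem.Dict.empty, 0)

-- the string both sides emit for character c of the full input
def pvVal (full : List Char) (c : Char) : List Char :=
  PySem.Int.toChars (((PySem.List.index? (PySem.List.dedup full) c).getD 0 : Nat) : Int)

-- A's remaining output after prefix p: every char but the last followed by a comma
def pvTail (full : List Char) : List Char → List Char
  | [] => []
  | [c] => pvVal full c
  | c :: c' :: r => pvVal full c ++ ',' :: pvTail full (c' :: r)

lemma pvDedup_snoc (p : List Char) (c : Char) :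
    PySem.List.dedup (p ++ [c]) = PySem.Set.add (PySem.List.dedup p) c := by
  simp [PySem.List.dedup_eq_ofList, PySem.Set.ofList_eq_foldl, List.foldl_append]

lemma pvStateA_snoc (p : List Char) (c : Char) :
    pvStateA (p ++ [c]) = pvStepA (pvStateA p) c := by
  simp [pvStateA, List.foldl_append]

-- invariant: the dict maps c to str(first-occurrence index in p), cnt counts the distinct chars
lemma pvStateA_spec (p : List Char) :
    (∀ c : Char, (pvStateA p).1.get? c =
        (PySem.List.index? (PySem.List.dedup p) c).map (fun k => PySem.Int.toChars (k : Int)))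
      ∧ (pvStateA p).2 = ((PySem.List.dedup p).length : Int) := by
  induction p using List.reverseRecOn with
  | nil => simp [pvStateA, PySem.Dict.get?_empty, PySem.List.index?_eq_idxOf?]
  | append_singleton p c ih =>
      obtain ⟨ihget, ihcnt⟩ := ih
      rw [pvStateA_snoc, pvDedup_snoc]
      have hmemd : c ∈ PySem.List.dedup p ↔ c ∈ p := PySem.List.mem_dedup p c
      have hcontains : (pvStateA p).1.contains c = decide (c ∈ p) := by
        rw [PySem.Dict.contains_eq_isSome_get?, ihget]
        by_cases hc : c ∈ p
        · obtain ⟨k, hk⟩ := Option.isSome_iff_exists.mp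
            ((PySem.List.index?_isSome_iff (xs := PySem.List.dedup p) (v := c)).mpr (hmemd.mpr hc))
          rw [hk]; simp [hc]
        · rw [(PySem.List.index?_eq_none_iff _ _).mpr (fun h => hc (hmemd.mp h))]
          simp [hc]
      by_cases hc : c ∈ p
      · have hadd : PySem.Set.add (PySem.List.dedup p) c = PySem.List.dedup p := by
          simp [PySem.Set.add, PySem.Set.contains]; exact hc
        have hstep : pvStepA (pvStateA p) c = pvStateA p := by
          simp [pvStepA, hcontains, hc]
        rw [hstep, hadd]; exact ⟨ihget, ihcnt⟩
      · have hcd : c ∉ PySem.List.dedup p := fun h => hc (hmemd.mp h)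
        have hadd : PySem.Set.add (PySem.List.dedup p) c = PySem.List.dedup p ++ [c] := by
          simp [PySem.Set.add, PySem.Set.contains]; exact hc
        have hstep : pvStepA (pvStateA p) c =
            ((pvStateA p).1.insert c (PySem.Int.toChars (pvStateA p).2), (pvStateA p).2 + 1) := by
          simp [pvStepA, hcontains, hc]
        rw [hstep, hadd]
        refine ⟨?_, ?_⟩
        · intro q
          by_cases hq : q = c
          · subst hq
            rw [PySem.Dict.get?_insert_self, PySem.List.index?_append_singleton_self _ _ hcd, ihcnt]
            simp
          · rw [PySem.Dict.get?_insert_of_ne _ _ hq, ihget]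
            by_cases hqm : q ∈ PySem.List.dedup p
            · rw [PySem.List.index?_append_of_mem [c] hqm]
            · have h1 : PySem.List.index? (PySem.List.dedup p) q = none :=
                (PySem.List.index?_eq_none_iff _ _).mpr hqm
              have h2 : PySem.List.index? (PySem.List.dedup p ++ [c]) q = none := by
                apply (PySem.List.index?_eq_none_iff _ _).mpr
                intro h
                rcases List.mem_append.mp h with h | h
                · exact hqm h
                · exact hq (List.mem_singleton.mp h)
              rw [h1, h2]
        · rw [ihcnt]; simp

-- dedup of a prefix is a prefix of dedup of the whole list
lemma pvDedup_prefix (p r : List Char) :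
    ∃ t, PySem.List.dedup (p ++ r) = PySem.List.dedup p ++ t := by
  induction r generalizing p with
  | nil => exact ⟨[], by simp⟩
  | cons c r ih =>
      have h1 : p ++ c :: r = (p ++ [c]) ++ r := by simp
      obtain ⟨t, ht⟩ := ih (p ++ [c])
      rw [h1, ht, pvDedup_snoc]
      by_cases hc : c ∈ p
      · exact ⟨t, by simp [PySem.Set.add, PySem.Set.contains, hc]⟩
      · exact ⟨c :: t, by simp [PySem.Set.add, PySem.Set.contains, hc]⟩

-- the value A emits at char c (after extending the prefix with c) is pvVal of the full string
lemma pvVal_step (p r : List Char) (c : Char) :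
    (pvStepA (pvStateA p) c).1.getD c [] = pvVal (p ++ c :: r) c := by
  have h1 : pvStepA (pvStateA p) c = pvStateA (p ++ [c]) := (pvStateA_snoc p c).symm
  have hmem : c ∈ PySem.List.dedup (p ++ [c]) := by
    rw [PySem.List.mem_dedup]; simp
  obtain ⟨k, hk⟩ := Option.isSome_iff_exists.mp
    ((PySem.List.index?_isSome_iff (xs := PySem.List.dedup (p ++ [c])) (v := c)).mpr hmem)
  have hfull : p ++ c :: r = (p ++ [c]) ++ r := by simp
  obtain ⟨t, ht⟩ := pvDedup_prefix (p ++ [c]) r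
  have hidx : PySem.List.index? (PySem.List.dedup (p ++ c :: r)) c = some k := by
    rw [hfull, ht, PySem.List.index?_append_of_mem t hmem, hk]
  rw [h1, PySem.Dict.getD_eq_get?_getD, (pvStateA_spec (p ++ [c])).1 c, hk]
  simp only [pvVal, PySem.List.index?_eq_idxOf?, PySem.List.dedup_eq_ofList] at hidx ⊢
  rw [hidx]
  simp

-- one-step unfolding of A's loop
lemma pvLoopA_cons (n : Nat) (c : Char) (rest : List Char)
    (st : PySem.Dict Char (List Char) × Int) (confirm : Nat) (s : List Char) :
    pvLoopA n (c :: rest) st confirm s =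
      pvLoopA n rest (pvStepA st c) (confirm + 1)
        (if confirm ≠ n then s ++ (pvStepA st c).1.getD c [] ++ [',']
         else s ++ (pvStepA st c).1.getD c []) := rfl

-- the main loop invariant
lemma pvLoopA_spec (full : List Char) :
    ∀ (r p s : List Char), full = p ++ r →
      pvLoopA full.length r (pvStateA p) (p.length + 1) s = s ++ pvTail full r := by
  intro r
  induction r with
  | nil => intro p s h; simp [pvLoopA, pvTail]
  | cons c rest ih =>
      intro p s h
      have hval : (pvStepA (pvStateA p) c).1.getD c [] = pvVal full c := by
        rw [h]; exact pvVal_step p rest c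
      have hst : pvStepA (pvStateA p) c = pvStateA (p ++ [c]) := (pvStateA_snoc p c).symm
      have hlen : full.length = p.length + rest.length + 1 := by rw [h]; simp; omega
      cases rest with
      | nil =>
          have hcond : ¬ (p.length + 1 ≠ full.length) := by simp at hlen; omega
          rw [pvLoopA_cons, if_neg hcond, hval]
          simp [pvLoopA, pvTail]
      | cons c' rest' =>
          have hcond : p.length + 1 ≠ full.length := by simp at hlen; omega
          have h2 : full = (p ++ [c]) ++ c' :: rest' := by simp [h]
          have ihh := ih (p ++ [c]) (s ++ pvVal full c ++ [',']) h2
          simp only [List.length_append, List.length_singleton] at ihh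
          rw [pvLoopA_cons, if_pos hcond, hval, hst, ihh]
          simp [pvTail]

-- pvTail is join with commas
lemma pvTail_eq_join (full : List Char) :
    ∀ cs : List Char, pvTail full cs = PySem.Chars.join [','] (cs.map (pvVal full)) := by
  intro cs
  induction cs with
  | nil => simp [pvTail, PySem.Chars.join_nil]
  | cons c rest ih =>
      cases rest with
      | nil => simp [pvTail, PySem.Chars.join_singleton]
      | cons c' rest' =>
          rw [pvTail, ih]
          simp [PySem.Chars.join_cons_cons]

-- B's closed form gives the first-occurrence index in the dedup:
-- distinct chars before c's first occurrence = c's index among the distinct chars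
lemma pvAlt_val (cs : List Char) (c : Char) (hc : c ∈ cs) :
    pvCode cs c = pvVal cs c := by
  unfold pvCode pvVal
  congr 1
  obtain ⟨k, hk⟩ := Option.isSome_iff_exists.mp
    ((PySem.List.index?_isSome_iff (xs := cs) (v := c)).mpr hc)
  obtain ⟨pre, suf, hsplit, hlen, hnot⟩ := (PySem.List.index?_eq_some_iff _ _ _).mp hk
  have htake : cs.take k = pre := by
    rw [hsplit, ← hlen, List.take_left]
  have hcd : c ∉ PySem.List.dedup pre := fun h => hnot ((PySem.List.mem_dedup pre c).mp h)
  have haddc : PySem.List.dedup (pre ++ [c]) = PySem.List.dedup pre ++ [c] := by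
    rw [pvDedup_snoc]
    simp [PySem.Set.add, PySem.Set.contains]; exact hnot
  have hmemc : c ∈ PySem.List.dedup (pre ++ [c]) := by
    rw [PySem.List.mem_dedup]; simp
  obtain ⟨t, ht⟩ := pvDedup_prefix (pre ++ [c]) suf
  have hidx : PySem.List.index? (PySem.List.dedup cs) c = some (PySem.List.dedup pre).length := by
    have h2 : cs = (pre ++ [c]) ++ suf := by simp [hsplit]
    rw [h2, ht, PySem.List.index?_append_of_mem t hmemc, haddc,
      PySem.List.index?_append_singleton_self _ _ hcd]
  rw [hk, hidx]
  simp [htake, PySem.List.dedup_eq_ofList]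

-- B's table lookup returns the closed-form code (keys of set(string) are distinct)
lemma pvAlt_table (cs : List Char) (c : Char) (hc : c ∈ cs) :
    ((PySem.Set.ofList cs).foldl (fun d k => d.insert k (pvCode cs k))
        PySem.Dict.empty).getD c [] = pvCode cs c := by
  have hitems : ((PySem.Set.ofList cs).foldl (fun d k => d.insert k (pvCode cs k))
      PySem.Dict.empty).items
      = (PySem.Set.ofList cs).map (fun k => (k, pvCode cs k)) := by
    have := PySem.Dict.items_foldl_insert_fresh (l := PySem.Set.ofList cs)
      (k := fun k => k) (v := fun k => pvCode cs k) (d := PySem.Dict.empty)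
      (by intro a _; exact PySem.Dict.contains_empty _)
      (by simp [PySem.Set.nodup_ofList])
    simpa using this
  have hnodup : ((PySem.Set.ofList cs).foldl (fun d k => d.insert k (pvCode cs k))
      PySem.Dict.empty).keys.Nodup := by
    apply PySem.Dict.nodup_keys_foldl_insert_key
    simp [PySem.Dict.keys_empty]
  have hpair : (c, pvCode cs c) ∈ ((PySem.Set.ofList cs).foldl
      (fun d k => d.insert k (pvCode cs k)) PySem.Dict.empty).items := by
    rw [hitems]
    exact List.mem_map.mpr ⟨c, (PySem.Set.mem_ofList cs c).mpr hc, rfl⟩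
  exact PySem.Dict.getD_of_mem_items _ hpair hnodup (d0 := [])

-- ===== VERDICT (by name: the statement is the Claim_ definition above) =====
theorem createTemplate_spec : Claim_equal_createTemplate := by
  intro string _
  unfold Spec_createTemplate createTemplate createTemplate_alt
  set cs := string.toList with hcs
  have hA : pvLoopA cs.length cs (PySem.Dict.empty, 0) 1 [] = pvTail cs cs := by
    have := pvLoopA_spec cs cs [] [] (by simp)
    simpa [pvStateA] using this
  rw [hA, pvTail_eq_join]
  congr 1
  apply congrArg
  apply List.map_congr_left
  intro c hc
  rw [pvAlt_table cs c hc, pvAlt_val cs c hc]
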